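-- pv_equiv track=rewrite | github.com/xRedCrystalx/xRedUtils | xRedUtils/strings.py | singularize
-- ===== SOURCE A (Python) =====
-- def singularize(plural: str) -> str:
--     """
--     Singularize a given plural word. -- Cannot handle irregular words.
--
--     ### Parameters:
--     - `plural` - The plural word to be singularized.
--
--     ### Returns:
--     - The singular form of the word.
--     """
--     if plural.endswith("ies"):
--         return plural[:-3] + "y"
--
--     elif [ending for ending in ["ses", "xes", "zes", "ches", "shes"] if plural.endswith(ending)]:
--         return plural[:-2]
--
--     elif plural.endswith("s"):
--         return plural[:-1]
--
--     return plural
-- ===== SOURCE B (Python) =====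
-- def singularize(plural: str) -> str:
--     """
--     Singularize a given plural word. -- Cannot handle irregular words.
--     """
--     match list(reversed(plural)):
--         case ['s', 'e', 'i', *stem]:
--             return ''.join(reversed(stem)) + 'y'
--         case ['s', 'e', c, *stem] if c in 'sxz':
--             return ''.join(reversed([c, *stem]))
--         case ['s', 'e', 'h', c, *stem] if c in 'cs':
--             return ''.join(reversed(['h', c, *stem]))
--         case ['s', *stem]:
--             return ''.join(reversed(stem))
--         case _:
--             return plural
-- ===== Notes on version B (the rewrite author's own statement) =====
-- stated objective: alternative
-- what changed: Replaced A's chain of endswith suffix tests (with a list-comprehension filter) by a single structural pattern match on the reversed character list: the trailing letters are inspected one character at a time, so no suffix strings and no endswith calls are used at all.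
import Mathlib
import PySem

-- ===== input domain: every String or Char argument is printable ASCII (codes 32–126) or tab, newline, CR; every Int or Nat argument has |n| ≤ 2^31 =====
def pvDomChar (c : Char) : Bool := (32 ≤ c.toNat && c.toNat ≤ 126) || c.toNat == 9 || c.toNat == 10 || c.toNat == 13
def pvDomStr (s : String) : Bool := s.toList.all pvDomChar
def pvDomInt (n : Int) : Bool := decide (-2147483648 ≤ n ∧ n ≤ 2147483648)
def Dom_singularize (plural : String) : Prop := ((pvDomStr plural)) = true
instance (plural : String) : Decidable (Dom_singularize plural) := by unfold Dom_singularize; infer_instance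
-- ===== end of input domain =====

-- B re-implements A's suffix tests as a single case analysis on the REVERSED character list (Python structural match; no endswith, no suffix table); alternative algorithm, same cost. 


-- ===== PORT A =====
def singularize (plural : String) : String :=
  if PySem.Str.endswith plural "ies" then
    PySem.Str.slice plural none (some (-3)) ++ "y"
  else if (["ses", "xes", "zes", "ches", "shes"].filter
      (fun ending => PySem.Str.endswith plural ending)) ≠ [] then
    PySem.Str.slice plural none (some (-2))
  else if PySem.Str.endswith plural "s" then
    PySem.Str.slice plural none (some (-1))
  else
    plural

-- ===== PORT B =====
-- Source B's `match list(reversed(plural))`: the case cascade (guards `if c in 'sxz'` / `if c in 'cs'`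
-- included) over the reversed char list; `''.join(reversed(xs))` is String.ofList xs.reverse.
def revMatch (plural : String) : List Char → String
  | c1 :: rest1 =>
    if c1 = 's' then
      match rest1 with
      | c2 :: c3 :: rest3 =>
        if c2 = 'e' then
          if c3 = 'i' then
            String.ofList rest3.reverse ++ "y"
          else if c3 = 's' ∨ c3 = 'x' ∨ c3 = 'z' then
            String.ofList (c3 :: rest3).reverse
          else if c3 = 'h' then
            match rest3 with
            | c4 :: stem =>
              if c4 = 'c' ∨ c4 = 's' then
                String.ofList ('h' :: c4 :: stem).reverse
              else
                String.ofList rest1.reverse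
            | [] => String.ofList rest1.reverse
          else
            String.ofList rest1.reverse
        else
          String.ofList rest1.reverse
      | _ => String.ofList rest1.reverse
    else
      plural
  | [] => plural

def singularize_alt (plural : String) : String :=
  revMatch plural plural.toList.reverse

-- ===== PRECONDITION & SPEC =====
def Spec_singularize (plural : String) (out : String) : Prop := out = singularize_alt plural
instance (plural : String) (out : String) : Decidable (Spec_singularize plural out) := by unfold Spec_singularize; infer_instance

-- ===== CLAIM (what is proved, stated in full; the proofs are below) =====
def Claim_equal_singularize : Prop := ∀ (plural : String), Dom_singularize plural → Spec_singularize plural (singularize plural)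

-- ===== LEMMAS AND PROOFS =====
theorem endswith_rev (l p : List Char) :
    PySem.Chars.endswith l p = List.isPrefixOf p.reverse l.reverse := by
  simp [PySem.Chars.endswith, List.isSuffixOf]

theorem take_sub (plural : String) (pre suf : List Char)
    (hl : plural.toList = pre ++ suf) :
    List.take (plural.length - suf.length) plural.toList = pre := by
  rw [← String.length_toList, hl]; simp

-- A on words ending in "ies"
theorem A_ies (plural : String) (rest : List Char)
    (hr : plural.toList.reverse = 's' :: 'e' :: 'i' :: rest) :
    singularize plural = String.ofList rest.reverse ++ "y" := by
  have hl : plural.toList = rest.reverse ++ ['i','e','s'] := by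
    have := congrArg List.reverse hr; simpa using this
  unfold singularize
  rw [show PySem.Str.endswith plural "ies" = true by
    simp [endswith_rev, hr, List.isPrefixOf]]
  apply String.toList_inj.mp
  rw [String.toList_append]
  simp [pysem]
  exact take_sub plural rest.reverse ['i','e','s'] hl

-- A on words ending in ses/xes/zes
theorem A_sxz (plural : String) (c3 : Char) (rest3 : List Char)
    (hr : plural.toList.reverse = 's' :: 'e' :: c3 :: rest3)
    (h : c3 = 's' ∨ c3 = 'x' ∨ c3 = 'z') :
    singularize plural = String.ofList (c3 :: rest3).reverse := by
  have hl : plural.toList = (rest3.reverse ++ [c3]) ++ ['e','s'] := by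
    have := congrArg List.reverse hr; simpa using this
  have hi : ¬ c3 = 'i' := by rcases h with h|h|h <;> simp [h]
  unfold singularize
  rw [show PySem.Str.endswith plural "ies" = false by
    simp [endswith_rev, hr, List.isPrefixOf, Ne.symm hi]]
  rw [if_neg (by simp)]
  rw [if_pos (show (["ses","xes","zes","ches","shes"].filter
      (fun ending => PySem.Str.endswith plural ending)) ≠ [] by
    rcases h with h|h|h <;> subst h <;>
      simp [endswith_rev, hr, List.isPrefixOf, List.filter])]
  apply String.toList_inj.mp
  simp [pysem]
  have := take_sub plural (rest3.reverse ++ [c3]) ['e','s'] hl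
  simpa using this

-- A on words ending in ches/shes
theorem A_hcs (plural : String) (c4 : Char) (stem : List Char)
    (hr : plural.toList.reverse = 's' :: 'e' :: 'h' :: c4 :: stem)
    (h : c4 = 'c' ∨ c4 = 's') :
    singularize plural = String.ofList ('h' :: c4 :: stem).reverse := by
  have hl : plural.toList = (stem.reverse ++ [c4, 'h']) ++ ['e','s'] := by
    have := congrArg List.reverse hr; simpa using this
  unfold singularize
  rw [show PySem.Str.endswith plural "ies" = false by
    simp [endswith_rev, hr, List.isPrefixOf]]
  rw [if_neg (by simp)]
  rw [if_pos (show (["ses","xes","zes","ches","shes"].filter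
      (fun ending => PySem.Str.endswith plural ending)) ≠ [] by
    rcases h with h|h <;> subst h <;>
      simp [endswith_rev, hr, List.isPrefixOf, List.filter])]
  apply String.toList_inj.mp
  simp [pysem]
  have := take_sub plural (stem.reverse ++ [c4, 'h']) ['e','s'] hl
  simpa using this

-- A on other words ending in 's': strip the final 's'
theorem A_s (plural : String) (rest1 : List Char)
    (hr : plural.toList.reverse = 's' :: rest1)
    (hies : List.isPrefixOf ['e','i'] rest1 = false)
    (hses : List.isPrefixOf ['e','s'] rest1 = false)
    (hxes : List.isPrefixOf ['e','x'] rest1 = false)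
    (hzes : List.isPrefixOf ['e','z'] rest1 = false)
    (hches : List.isPrefixOf ['e','h','c'] rest1 = false)
    (hshes : List.isPrefixOf ['e','h','s'] rest1 = false) :
    singularize plural = String.ofList rest1.reverse := by
  have hl : plural.toList = rest1.reverse ++ ['s'] := by
    have := congrArg List.reverse hr; simpa using this
  unfold singularize
  rw [show PySem.Str.endswith plural "ies" = false by
    simp [endswith_rev, hr, hies]]
  rw [if_neg (by simp)]
  rw [if_neg (show ¬ (["ses","xes","zes","ches","shes"].filter
      (fun ending => PySem.Str.endswith plural ending)) ≠ [] by
    simp [endswith_rev, hr, List.filter, hses, hxes, hzes, hches, hshes])]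
  rw [if_pos (show PySem.Str.endswith plural "s" = true by
    simp [endswith_rev, hr, List.isPrefixOf])]
  apply String.toList_inj.mp
  simp [pysem, hl]

-- A on words not ending in 's'
theorem A_none (plural : String) (c1 : Char) (rest1 : List Char)
    (hr : plural.toList.reverse = c1 :: rest1) (h1 : ¬ c1 = 's') :
    singularize plural = plural := by
  have hb : ('s' == c1) = false := by simp [Ne.symm h1]
  unfold singularize
  rw [show PySem.Str.endswith plural "ies" = false by
    simp [endswith_rev, hr, List.isPrefixOf, hb]]
  rw [if_neg (by simp)]
  rw [if_neg (show ¬ (["ses","xes","zes","ches","shes"].filter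
      (fun ending => PySem.Str.endswith plural ending)) ≠ [] by
    simp [endswith_rev, hr, List.isPrefixOf, List.filter, hb])]
  rw [if_neg (show ¬ PySem.Str.endswith plural "s" = true by
    simp [endswith_rev, hr, List.isPrefixOf, hb])]

-- A on the empty string
theorem A_nil (plural : String)
    (hr : plural.toList.reverse = []) :
    singularize plural = plural := by
  unfold singularize
  rw [show PySem.Str.endswith plural "ies" = false by
    simp [endswith_rev, hr]]
  rw [if_neg (by simp)]
  rw [if_neg (show ¬ (["ses","xes","zes","ches","shes"].filter
      (fun ending => PySem.Str.endswith plural ending)) ≠ [] by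
    simp [endswith_rev, hr, List.filter])]
  rw [if_neg (show ¬ PySem.Str.endswith plural "s" = true by
    simp [endswith_rev, hr])]

theorem singularize_eq_alt (plural : String) : singularize plural = singularize_alt plural := by
  rcases hr : plural.toList.reverse with _ | ⟨c1, rest1⟩
  · have hB : singularize_alt plural = plural := by
      unfold singularize_alt; rw [hr]; simp [revMatch]
    rw [hB]; exact A_nil plural hr
  · by_cases h1 : c1 = 's'
    · subst h1
      rcases rest1 with _ | ⟨c2, _ | ⟨c3, rest3⟩⟩
      · -- plural = "s"
        have hB : singularize_alt plural = String.ofList [] := by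
          unfold singularize_alt; rw [hr]; simp [revMatch]
        rw [hB]
        exact A_s plural [] hr rfl rfl rfl rfl rfl rfl
      · -- reverse = ['s', c2]
        have hB : singularize_alt plural = String.ofList [c2] := by
          unfold singularize_alt; rw [hr]; simp [revMatch]
        rw [hB]
        have := A_s plural [c2] hr (by simp [List.isPrefixOf]) (by simp [List.isPrefixOf])
          (by simp [List.isPrefixOf]) (by simp [List.isPrefixOf])
          (by simp [List.isPrefixOf]) (by simp [List.isPrefixOf])
        simpa using this
      · by_cases h2 : c2 = 'e'
        · subst h2
          by_cases h3 : c3 = 'i'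
          · subst h3
            have hB : singularize_alt plural = String.ofList rest3.reverse ++ "y" := by
              unfold singularize_alt; rw [hr]; simp [revMatch]
            rw [hB]; exact A_ies plural rest3 hr
          · by_cases h4 : c3 = 's' ∨ c3 = 'x' ∨ c3 = 'z'
            · have hB : singularize_alt plural = String.ofList (c3 :: rest3).reverse := by
                unfold singularize_alt; rw [hr]; simp [revMatch, h3, h4]
              rw [hB]; exact A_sxz plural c3 rest3 hr h4
            · by_cases h5 : c3 = 'h'
              · subst h5
                rcases rest3 with _ | ⟨c4, stem⟩
                · -- reverse = ['s','e','h']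
                  have hB : singularize_alt plural = String.ofList ['h','e'] := by
                    unfold singularize_alt; rw [hr]; simp [revMatch]
                  rw [hB]
                  have := A_s plural ['e','h'] hr (by decide) (by decide)
                    (by decide) (by decide) (by decide) (by decide)
                  simpa using this
                · by_cases h6 : c4 = 'c' ∨ c4 = 's'
                  · have hB : singularize_alt plural = String.ofList ('h' :: c4 :: stem).reverse := by
                      unfold singularize_alt; rw [hr]; simp [revMatch, h6]
                    rw [hB]; exact A_hcs plural c4 stem hr h6
                  · have hc : ¬ c4 = 'c' := fun e => h6 (Or.inl e)
                    have hs : ¬ c4 = 's' := fun e => h6 (Or.inr e)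
                    have hB : singularize_alt plural = String.ofList ('e' :: 'h' :: c4 :: stem).reverse := by
                      unfold singularize_alt; rw [hr]; simp [revMatch, h6]
                    rw [hB]
                    exact A_s plural ('e' :: 'h' :: c4 :: stem) hr
                      (by simp [List.isPrefixOf]) (by simp [List.isPrefixOf])
                      (by simp [List.isPrefixOf]) (by simp [List.isPrefixOf])
                      (by simp [List.isPrefixOf, Ne.symm hc]) (by simp [List.isPrefixOf, Ne.symm hs])
              · have hss : ¬ c3 = 's' := fun e => h4 (Or.inl e)
                have hx : ¬ c3 = 'x' := fun e => h4 (Or.inr (Or.inl e))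
                have hz : ¬ c3 = 'z' := fun e => h4 (Or.inr (Or.inr e))
                have hB : singularize_alt plural = String.ofList ('e' :: c3 :: rest3).reverse := by
                  unfold singularize_alt; rw [hr]; simp [revMatch, h3, h4, h5]
                rw [hB]
                exact A_s plural ('e' :: c3 :: rest3) hr
                  (by simp [List.isPrefixOf, Ne.symm h3]) (by simp [List.isPrefixOf, Ne.symm hss])
                  (by simp [List.isPrefixOf, Ne.symm hx]) (by simp [List.isPrefixOf, Ne.symm hz])
                  (by simp [List.isPrefixOf, Ne.symm h5]) (by simp [List.isPrefixOf, Ne.symm h5])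
        · have hB : singularize_alt plural = String.ofList (c2 :: c3 :: rest3).reverse := by
            unfold singularize_alt; rw [hr]; simp [revMatch, h2]
          rw [hB]
          exact A_s plural (c2 :: c3 :: rest3) hr
            (by simp [List.isPrefixOf, Ne.symm h2]) (by simp [List.isPrefixOf, Ne.symm h2])
            (by simp [List.isPrefixOf, Ne.symm h2]) (by simp [List.isPrefixOf, Ne.symm h2])
            (by simp [List.isPrefixOf, Ne.symm h2]) (by simp [List.isPrefixOf, Ne.symm h2])
    · have hB : singularize_alt plural = plural := by
        unfold singularize_alt; rw [hr]; simp [revMatch, h1]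
      rw [hB]; exact A_none plural c1 rest1 hr h1

-- ===== VERDICT (by name: the statement is the Claim_ definition above) =====
theorem singularize_spec : Claim_equal_singularize := by
  intro plural _
  unfold Spec_singularize
  exact singularize_eq_alt plural
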